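-- pv_equiv track=rewrite | github.com/limkeunhyeok/algorithm-study | keunhak/nhn/prob3.py | getOptimalIndex
-- ===== SOURCE A (Python) =====
-- def getOptimalIndex(goodsList):
--     max = -1
--     ret = 0
--
--     for i in range(len(goodsList)):
--         cnt = 0
--         for w in range(0, 5):
--             if goodsList[i] + w in goodsList:
--                 cnt += 1
--         if cnt > max:
--             max = cnt
--             ret = i
--
--     return ret
-- ===== SOURCE B (Python) =====
-- def getOptimalIndex(goodsList):
--     # Sort the distinct values, then sweep a two-pointer window [v, v+4] over the
--     # sorted list so each distinct value's score (= count of distinct values in its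
--     # window) is obtained in amortized O(1); finish with one selection pass.
--     uniq = sorted(set(goodsList))
--     n = len(uniq)
--     scores = {}
--     j = 0
--     for i in range(n):
--         if j < i:
--             j = i
--         while j < n and uniq[j] <= uniq[i] + 4:
--             j += 1
--         scores[uniq[i]] = j - i
--     best = -1
--     ret = 0
--     for i, v in enumerate(goodsList):
--         if scores[v] > best:
--             best = scores[v]
--             ret = i
--     return ret
-- ===== Notes on version B (the rewrite author's own statement) =====
-- stated objective: faster
-- what changed: Replaces A's per-index rescan (membership test for each of the 5 window offsets against the whole list, O(n^2)) with sort-the-distinct-values plus a two-pointer sliding window that computes each distinct value's window score in amortized O(1), followed by a single selection pass with strict '>' keeping A's first-index tie rule.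
import Mathlib
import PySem

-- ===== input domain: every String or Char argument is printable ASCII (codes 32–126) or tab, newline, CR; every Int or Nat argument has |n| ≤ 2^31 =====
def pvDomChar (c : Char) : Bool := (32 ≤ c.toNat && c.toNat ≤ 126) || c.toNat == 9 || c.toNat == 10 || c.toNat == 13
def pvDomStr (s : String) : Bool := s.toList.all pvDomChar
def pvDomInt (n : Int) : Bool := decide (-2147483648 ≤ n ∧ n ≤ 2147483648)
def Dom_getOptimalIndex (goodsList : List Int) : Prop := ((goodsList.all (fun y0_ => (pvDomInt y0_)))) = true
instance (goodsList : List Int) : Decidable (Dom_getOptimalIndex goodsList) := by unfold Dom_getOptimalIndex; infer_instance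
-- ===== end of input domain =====

-- B sorts the distinct values and sweeps a two-pointer window [v, v+4] over the sorted
-- list to score each distinct value, then does one selection pass (objective: faster).

-- ===== PORT A =====
-- inner 'for w in range(0, 5)' loop of A, extracted as a helper
def pvACnt (goodsList : List Int) (x : Int) : Int :=
  (PySem.List.pyRange 0 5 1).foldl
    (fun cnt w => if (x + w) ∈ goodsList then cnt + 1 else cnt) 0

def getOptimalIndex (goodsList : List Int) : Int :=
  ((PySem.List.pyRange 0 (goodsList.length : Int) 1).foldl
    (fun (st : Int × Int) i =>
      let cnt := pvACnt goodsList (PySem.List.pyGetD goodsList i 0)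
      if cnt > st.1 then (cnt, i) else st) (-1, 0)).2

-- ===== PORT B =====
-- 'while j < n and uniq[j] <= bound: j += 1'
def pvAdv (u : List Int) (bound : Int) (j : Int) : Int :=
  if h : j < (u.length : Int) then
    if PySem.List.pyGetD u j 0 ≤ bound then pvAdv u bound (j + 1) else j
  else j
termination_by (u.length - j).toNat
decreasing_by omega

-- body of 'for i in range(n)': pull j up to i if behind, run the while loop, record score
def pvBStep (u : List Int) (st : Int × PySem.Dict Int Int) (i : Int) : Int × PySem.Dict Int Int :=
  let j0 := if st.1 < i then i else st.1
  let v := PySem.List.pyGetD u i 0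
  let j := pvAdv u (v + 4) j0
  (j, st.2.insert v (j - i))

def getOptimalIndex_alt (goodsList : List Int) : Int :=
  let uniq := PySem.List.sorted (PySem.Set.ofList goodsList) (fun x => x) false
  let scores := ((PySem.List.pyRange 0 (uniq.length : Int) 1).foldl (pvBStep uniq) (0, PySem.Dict.empty)).2
  -- scores[v] is exact as getD: every value of goodsList was keyed in the first loop
  ((PySem.List.enumerate goodsList 0).foldl
    (fun (st : Int × Int) p =>
      let s := scores.getD p.2 0
      if s > st.1 then (s, p.1) else st) (-1, 0)).2

-- ===== PRECONDITION & SPEC =====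
def Spec_getOptimalIndex (goodsList : List Int) (out : Int) : Prop := out = getOptimalIndex_alt goodsList
instance (goodsList : List Int) (out : Int) : Decidable (Spec_getOptimalIndex goodsList out) := by unfold Spec_getOptimalIndex; infer_instance

-- ===== CLAIM (what is proved, stated in full; the proofs are below) =====
def Claim_equal_getOptimalIndex : Prop := ∀ (goodsList : List Int), Dom_getOptimalIndex goodsList → Spec_getOptimalIndex goodsList (getOptimalIndex goodsList)

-- ===== LEMMAS AND PROOFS =====

-- on a (weakly) sorted list, 'value at k is ≤ b' is 'k is below the count of elements ≤ b'
theorem pv_le_iff_lt_countP (u : List Int) (hu : u.Pairwise (· ≤ ·)) (b : Int)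
    (k : Nat) (hk : k < u.length) :
    u[k] ≤ b ↔ k < u.countP (fun x => decide (x ≤ b)) := by
  induction u generalizing k with
  | nil => simp at hk
  | cons a u ih =>
    have hu' := (List.pairwise_cons.1 hu)
    match k with
    | 0 =>
      simp only [List.getElem_cons_zero, List.countP_cons]
      constructor
      · intro hab; simp [hab]
      · intro h
        by_contra hab
        have h0 : u.countP (fun x => decide (x ≤ b)) = 0 := by
          apply List.countP_eq_zero.2
          intro x hx
          have := hu'.1 x hx
          simp; omega
        simp [h0, hab] at h
    | k + 1 =>
      simp only [List.getElem_cons_succ, List.countP_cons]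
      rw [ih hu'.2 k (by simpa using hk)]
      by_cases hab : a ≤ b
      · simp [hab]
      · have h0 : u.countP (fun x => decide (x ≤ b)) = 0 := by
          apply List.countP_eq_zero.2
          intro x hx
          have := hu'.1 x hx
          simp; omega
        simp [h0, hab]

-- the while loop lands on max of the start pointer and the count of elements ≤ bound
theorem pv_adv_eq (u : List Int) (hu : u.Pairwise (· ≤ ·)) (bound j : Int) (h0 : 0 ≤ j) :
    pvAdv u bound j = max j (u.countP (fun x => decide (x ≤ bound)) : Int) := by
  induction j using pvAdv.induct (u := u) (bound := bound) with
  | case1 j h hle ih =>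
    rw [pvAdv, dif_pos h, if_pos hle]
    have hjn : j.toNat < u.length := by omega
    have hget : PySem.List.pyGetD u j 0 = u[j.toNat] := by
      rw [PySem.List.pyGetD_of_nonneg u 0 (by omega), List.getD_eq_getElem u 0 hjn]
    rw [hget] at hle
    have hcnt := (pv_le_iff_lt_countP u hu bound j.toNat hjn).1 hle
    rw [ih (by omega)]
    omega
  | case2 j h hle =>
    rw [pvAdv, dif_pos h, if_neg hle]
    have hjn : j.toNat < u.length := by omega
    have hget : PySem.List.pyGetD u j 0 = u[j.toNat] := by
      rw [PySem.List.pyGetD_of_nonneg u 0 (by omega), List.getD_eq_getElem u 0 hjn]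
    rw [hget] at hle
    have hcnt : ¬ (j.toNat < u.countP (fun x => decide (x ≤ bound))) := by
      intro hc
      exact hle ((pv_le_iff_lt_countP u hu bound j.toNat hjn).2 hc)
    omega
  | case3 j h =>
    rw [pvAdv, dif_neg h]
    have : u.countP (fun x => decide (x ≤ bound)) ≤ u.length := List.countP_le_length
    omega

-- a predicate that holds exactly on the first k positions has count k
theorem pv_countP_index {α : Type} (u : List α) (p : α → Bool) (k : Nat) (hk : k ≤ u.length)
    (h : ∀ j (hj : j < u.length), p u[j] = decide (j < k)) : u.countP p = k := by
  induction u generalizing k with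
  | nil => simp at hk ⊢; omega
  | cons a u ih =>
    have h0 := h 0 (by simp)
    match k with
    | 0 =>
      simp only [List.getElem_cons_zero] at h0
      simp only [List.countP_cons]
      rw [ih 0 (by omega) (fun j hj => by
        have := h (j+1) (by simpa using Nat.succ_lt_succ hj)
        simpa using this)]
      simp at h0 ⊢
      simp [h0]
    | k + 1 =>
      simp only [List.getElem_cons_zero] at h0
      simp only [List.countP_cons]
      rw [ih k (by simpa using hk) (fun j hj => by
        have := h (j+1) (by simpa using Nat.succ_lt_succ hj)
        simp only [List.getElem_cons_succ] at this
        rw [this]; simp)]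
      simp [h0]

theorem pv_countP_split (u : List Int) (v : Int) :
    u.countP (fun y => decide (y ≤ v + 4))
      = u.countP (fun y => decide (y ≤ v - 1)) + u.countP (fun y => decide (v ≤ y ∧ y ≤ v + 4)) := by
  induction u with
  | nil => simp
  | cons a u ih =>
    simp only [List.countP_cons, ih, decide_eq_true_eq]
    split_ifs <;> omega

theorem pv_window_sum (u : List Int) (v : Int) :
    u.countP (fun y => decide (v ≤ y ∧ y ≤ v + 4))
      = u.count v + u.count (v+1) + u.count (v+2) + u.count (v+3) + u.count (v+4) := by
  induction u with
  | nil => simp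
  | cons a u ih =>
    simp only [List.countP_cons, List.count_cons, ih, decide_eq_true_eq, beq_iff_eq]
    split_ifs <;> omega

theorem pv_countP_window (u : List Int) (hu : u.Nodup) (v : Int) :
    u.countP (fun y => decide (v ≤ y ∧ y ≤ v + 4))
      = (PySem.List.pyRange 0 5 1).countP (fun w => decide (v + w ∈ u)) := by
  have hr : PySem.List.pyRange 0 5 1 = [0, 1, 2, 3, 4] := by decide
  rw [hr, pv_window_sum]
  have hind : ∀ t : Int, u.count t = if t ∈ u then 1 else 0 := by
    intro t; by_cases ht : t ∈ u
    · simp [ht, List.count_eq_one_of_mem hu ht]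
    · simp [ht, List.count_eq_zero_of_not_mem ht]
  simp only [List.countP_cons, List.countP_nil, hind, decide_eq_true_eq, add_zero]
  split_ifs <;> omega

-- invariant of B's two-pointer loop over the strictly increasing list u
theorem pv_bloop (u : List Int) (hu : u.Pairwise (· < ·)) (m : Nat) (hm : m ≤ u.length) :
    0 ≤ ((PySem.List.pyRange 0 (m : Int) 1).foldl (pvBStep u) (0, PySem.Dict.empty)).1
    ∧ (∀ k, m ≤ k → k < u.length →
        ((PySem.List.pyRange 0 (m : Int) 1).foldl (pvBStep u) (0, PySem.Dict.empty)).1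
          ≤ (u.countP (fun x => decide (x ≤ u.getD k 0 + 4)) : Int))
    ∧ (∀ k, k < m →
        (((PySem.List.pyRange 0 (m : Int) 1).foldl (pvBStep u) (0, PySem.Dict.empty)).2).getD (u.getD k 0) 0
          = (u.countP (fun x => decide (x ≤ u.getD k 0 + 4)) : Int) - k) := by
  have hle : u.Pairwise (· ≤ ·) := hu.imp (fun h => le_of_lt h)
  have hmono := List.pairwise_iff_getElem.1 hu
  induction m with
  | zero =>
    rw [PySem.List.pyRange_one_eq_nil (by omega)]
    refine ⟨le_refl 0, fun k _ _ => ?_, fun k hk => by omega⟩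
    simp
  | succ m ih =>
    obtain ⟨ih1, ih2, ih3⟩ := ih (by omega)
    have hmlen : m < u.length := by omega
    have hcast : ((m + 1 : Nat) : Int) = (m : Int) + 1 := by push_cast; ring
    rw [hcast, PySem.List.pyRange_one_succ_right (by positivity), List.foldl_append,
        List.foldl_cons, List.foldl_nil]
    set st := (PySem.List.pyRange 0 (m : Int) 1).foldl (pvBStep u) (0, PySem.Dict.empty) with hst
    have hv : PySem.List.pyGetD u (m : Int) 0 = u.getD m 0 := by
      rw [PySem.List.pyGetD_of_nonneg u 0 (by omega)]; simp
    have hvg : u.getD m 0 = u[m] := List.getD_eq_getElem u 0 hmlen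
    set C : Int := (u.countP (fun x => decide (x ≤ u.getD m 0 + 4)) : Int) with hC
    have hmC : (m : Int) < C := by
      have := (pv_le_iff_lt_countP u hle (u[m] + 4) m hmlen).1 (by omega)
      rw [hC, hvg]; exact_mod_cast this
    have hstC : st.1 ≤ C := ih2 m (le_refl m) hmlen
    have hstep : pvBStep u st (m : Int) = (C, st.2.insert (u.getD m 0) (C - m)) := by
      simp only [pvBStep, hv]
      have hj0 : (0:Int) ≤ (if st.1 < (m:Int) then (m:Int) else st.1) := by
        split_ifs <;> omega
      rw [pv_adv_eq u hle _ _ hj0]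
      have : max (if st.1 < (m:Int) then (m:Int) else st.1) C = C := by
        split_ifs <;> omega
      rw [hC] at this
      rw [this]
    rw [hstep]
    refine ⟨by omega, fun k hk hklen => ?_, fun k hk => ?_⟩
    · -- C ≤ count for any later k
      simp only []
      rw [hC]
      have hmk : u.getD m 0 ≤ u.getD k 0 := by
        rcases Nat.lt_or_ge m k with h | h
        · have := hmono m k hmlen hklen h
          rw [hvg, List.getD_eq_getElem u 0 hklen]; omega
        · have : k = m := by omega
          simp [this]
      have := List.countP_mono_left (l := u)
        (p := fun x => decide (x ≤ u.getD m 0 + 4)) (q := fun x => decide (x ≤ u.getD k 0 + 4))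
        (fun x _ hx => by simp only [decide_eq_true_eq] at hx ⊢; omega)
      exact_mod_cast this
    · -- dict lookup
      simp only []
      rcases Nat.lt_or_ge k m with h | h
      · have hne : u.getD k 0 ≠ u.getD m 0 := by
          have := hmono k m (by omega) hmlen h
          rw [List.getD_eq_getElem u 0 (by omega), hvg]; omega
        rw [PySem.Dict.getD_insert, if_neg hne]
        exact ih3 k h
      · have : k = m := by omega
        subst this
        rw [PySem.Dict.getD_insert, if_pos rfl]

-- the looked-up score equals A's per-index count, for every value of the list
theorem pv_score_eq (xs : List Int) (v : Int) (hv : v ∈ xs) :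
    (((PySem.List.pyRange 0 ((PySem.List.sorted (PySem.Set.ofList xs) (fun x => x) false).length : Int) 1).foldl
        (pvBStep (PySem.List.sorted (PySem.Set.ofList xs) (fun x => x) false)) (0, PySem.Dict.empty)).2).getD v 0
      = pvACnt xs v := by
  set u := PySem.List.sorted (PySem.Set.ofList xs) (fun x => x) false with hudef
  have hu : u.Pairwise (· < ·) := PySem.List.sorted_ofList_pairwise_lt xs
  have hmono := List.pairwise_iff_getElem.1 hu
  have hmemu : ∀ t : Int, t ∈ u ↔ t ∈ xs := by
    intro t
    rw [hudef, PySem.List.mem_sorted, PySem.Set.mem_ofList]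
  obtain ⟨k, hklen, hkv⟩ := List.mem_iff_getElem.1 ((hmemu v).2 hv)
  have hnodup : u.Nodup := hu.imp (fun h => ne_of_lt h)
  have hb := (pv_bloop u hu u.length (le_refl _)).2.2 k hklen
  have hgd : u.getD k 0 = v := by rw [List.getD_eq_getElem u 0 hklen, hkv]
  rw [hgd] at hb
  rw [hb]
  -- k is the number of elements ≤ v - 1
  have hkcount : u.countP (fun y => decide (y ≤ v - 1)) = k := by
    apply pv_countP_index u _ k (by omega)
    intro j hj
    rcases Nat.lt_or_ge j k with h | h
    · have := hmono j k hj hklen h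
      simp [hkv] at this ⊢
      omega
    · rcases Nat.eq_or_lt_of_le h with h' | h'
      · subst h'; simp [hkv]
      · have := hmono k j hklen hj h'
        simp [hkv] at this ⊢
        omega
  have hsplit := pv_countP_split u v
  rw [hkcount] at hsplit
  have hwin := pv_countP_window u hnodup v
  have hcong : (PySem.List.pyRange 0 5 1).countP (fun w => decide (v + w ∈ u))
      = (PySem.List.pyRange 0 5 1).countP (fun w => decide (v + w ∈ xs)) := by
    apply List.countP_congr
    intro w _
    simp [hmemu]
  have hA : pvACnt xs v = ((PySem.List.pyRange 0 5 1).countP (fun w => decide (v + w ∈ xs)) : Int) := by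
    unfold pvACnt
    rw [PySem.List.foldl_ite_add_one (p := fun w => (v + w) ∈ xs)]
    ring
  rw [hA, ← hcong, ← hwin]
  omega

-- ===== VERDICT (by name: the statement is the Claim_ definition above) =====
theorem getOptimalIndex_spec : Claim_equal_getOptimalIndex := by
  intro xs _
  unfold Spec_getOptimalIndex getOptimalIndex getOptimalIndex_alt
  simp only []
  rw [PySem.List.enumerate_eq_map_pyRange xs 0, List.foldl_map]
  congr 1
  apply PySem.List.foldl_congr_mem'
  intro i hi st
  have hrange := (PySem.List.mem_pyRange_one).1 hi
  have hmem : PySem.List.pyGetD xs i 0 ∈ xs :=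
    PySem.List.pyGetD_mem xs 0 (by unfold PySem.Raise.InRange; omega)
  simp only [pv_score_eq xs _ hmem]
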